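-- pv_equiv track=rewrite | github.com/wherby/code | contest/00000c275d69/d81/q3/t3.py | maximumXOR
-- ===== SOURCE A (Python) =====
-- def maximumXOR(nums):
--     """
--     :type nums: List[int]
--     :rtype: int
--     """
--     ls =[0]*32
--     for a in nums:
--         for i in range(32):
--             if a &(1<<i) != 0:
--                 ls[i] =1
--     ret = 0
--     for i in range(32):
--         if ls[i] ==1:
--             ret += 1<<i
--     return ret
-- ===== SOURCE B (Python) =====
-- def maximumXOR(nums):
--     """
--     :type nums: List[int]
--     :rtype: int
--     """
--     ret = 0
--     for a in nums:
--         ret |= a & 0xFFFFFFFF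
--     return ret
-- ===== Notes on version B (the rewrite author's own statement) =====
-- stated objective: simpler
-- what changed: Replaces A's 32-entry per-bit presence table (built by a nested 32-iteration scan per element) and its separate 32-step reconstruction loop with a single pass keeping a running bitwise OR of each element's low 32 bits.
import Mathlib
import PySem

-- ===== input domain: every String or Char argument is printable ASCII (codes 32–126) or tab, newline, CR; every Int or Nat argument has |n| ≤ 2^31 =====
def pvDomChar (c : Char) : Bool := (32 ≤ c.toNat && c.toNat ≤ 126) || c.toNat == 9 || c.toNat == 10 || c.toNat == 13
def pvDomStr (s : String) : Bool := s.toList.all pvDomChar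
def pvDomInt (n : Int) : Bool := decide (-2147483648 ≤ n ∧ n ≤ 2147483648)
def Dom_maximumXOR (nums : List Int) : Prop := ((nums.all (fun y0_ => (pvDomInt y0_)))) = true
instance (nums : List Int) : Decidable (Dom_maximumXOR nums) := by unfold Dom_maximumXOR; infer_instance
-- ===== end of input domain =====

-- B replaces A's 32-entry per-bit presence table and its reconstruction loop with one running bitwise OR (simpler, one pass).

-- ===== PORT A =====
-- A builds a 32-entry 0/1 table ls (entry i = some element has bit i set), then rebuilds the integer from it.
def maximumXOR (nums : List Int) : Int :=
  let ls0 : List Int := List.replicate 32 0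
  let ls := nums.foldl (fun ls a =>
      (PySem.List.pyRange 0 32 1).foldl (fun ls i =>
        if Int.land a ((1 : Int) <<< i) ≠ 0 then ls.set i.toNat 1 else ls) ls) ls0
  (PySem.List.pyRange 0 32 1).foldl (fun ret i =>
      if PySem.List.pyGetD ls i 0 = 1 then ret + (1 : Int) <<< i else ret) 0

-- ===== PORT B =====
def maximumXOR_alt (nums : List Int) : Int :=
  nums.foldl (fun ret a => Int.lor ret (Int.land a 4294967295)) 0

-- ===== PRECONDITION & SPEC =====
def Spec_maximumXOR (nums : List Int) (out : Int) : Prop := out = maximumXOR_alt nums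
instance (nums : List Int) (out : Int) : Decidable (Spec_maximumXOR nums out) := by unfold Spec_maximumXOR; infer_instance

-- ===== CLAIM (what is proved, stated in full; the proofs are below) =====
def Claim_equal_maximumXOR : Prop := ∀ (nums : List Int), Dom_maximumXOR nums → Spec_maximumXOR nums (maximumXOR nums)

-- ===== LEMMAS AND PROOFS =====


theorem land_one_shift_ne (a : Int) (k : Nat) :
    (Int.land a ((1 : Int) <<< (k : Int)) ≠ 0) ↔ a.testBit k = true := by
  have hs : (1 : Int) <<< (k : Int) = (2:Int)^k := by simp [Int.shiftLeft_eq_mul_pow]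
  rw [hs]
  have h2 : ((2:Int)^k) = Int.ofNat (2^k) := by rw [Int.ofNat_eq_natCast]; push_cast; ring
  rw [h2]
  cases a with
  | ofNat n =>
      show (Int.ofNat (n &&& 2^k) ≠ 0) ↔ n.testBit k = true
      rw [Nat.and_two_pow]
      cases h : n.testBit k <;> simp [Nat.pos_iff_ne_zero.mp (Nat.two_pow_pos k)]
  | negSucc m =>
      show (Int.ofNat (Nat.ldiff (2^k) m) ≠ 0) ↔ (!(m.testBit k)) = true
      have hld : Nat.ldiff (2^k) m = if m.testBit k then 0 else 2^k := by
        apply Nat.eq_of_testBit_eq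
        intro i
        rw [Nat.testBit_ldiff, Nat.testBit_two_pow]
        by_cases hik : k = i
        · subst hik; cases h : m.testBit k <;> simp [h]
        · cases h : m.testBit k <;> simp [hik]
      rw [hld]
      cases h : m.testBit k <;> simp [Nat.pos_iff_ne_zero.mp (Nat.two_pow_pos k)]

theorem testBit_land_mask (a : Int) (j : Nat) :
    (Int.land a 4294967295).testBit j = (decide (j < 32) && a.testBit j) := by
  have hm : (4294967295 : Int) = Int.ofNat 4294967295 := rfl
  rw [hm, Int.testBit_land]
  have : (Int.ofNat 4294967295).testBit j = Nat.testBit 4294967295 j := rfl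
  rw [this]
  have h32 : (4294967295 : Nat) = 2^32 - 1 := by norm_num
  rw [h32, Nat.testBit_two_pow_sub_one]
  rw [Bool.and_comm]

theorem land_mask_nonneg (a : Int) : 0 ≤ Int.land a 4294967295 := by
  have hm : (4294967295 : Int) = Int.ofNat 4294967295 := rfl
  rw [hm]
  cases a with
  | ofNat n => exact Int.ofNat_nonneg _
  | negSucc m => exact Int.ofNat_nonneg _

theorem lor_nonneg' (a b : Int) (ha : 0 ≤ a) (hb : 0 ≤ b) : 0 ≤ Int.lor a b := by
  obtain ⟨n, rfl⟩ := Int.eq_ofNat_of_zero_le ha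
  obtain ⟨m, rfl⟩ := Int.eq_ofNat_of_zero_le hb
  exact Int.ofNat_nonneg _

theorem altFold_spec (nums : List Int) (r : Int) (hr : 0 ≤ r) :
    0 ≤ nums.foldl (fun ret a => Int.lor ret (Int.land a 4294967295)) r ∧
    ∀ j, (nums.foldl (fun ret a => Int.lor ret (Int.land a 4294967295)) r).testBit j
        = (r.testBit j || (decide (j < 32) && nums.any (fun a => a.testBit j))) := by
  induction nums generalizing r with
  | nil => simp [hr]
  | cons a t ih =>
      obtain ⟨h1, h2⟩ := ih (Int.lor r (Int.land a 4294967295))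
        (lor_nonneg' _ _ hr (land_mask_nonneg a))
      refine ⟨h1, fun j => ?_⟩
      rw [List.foldl_cons] at *
      rw [h2 j, Int.testBit_lor, testBit_land_mask]
      cases r.testBit j <;> cases h : a.testBit j <;> by_cases hj : j < 32 <;> simp [hj, h]

theorem foldl_set_getD (p : Nat → Bool) (l : List Nat) (ls : List Int) (j : Nat) (hj : j < ls.length) :
    (l.foldl (fun ls k => if p k then ls.set k 1 else ls) ls).getD j 0
      = if j ∈ l ∧ p j = true then 1 else ls.getD j 0 := by
  induction l generalizing ls with
  | nil => simp
  | cons k t ih =>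
      rw [List.foldl_cons]
      by_cases hpk : p k
      · rw [if_pos hpk, ih (ls.set k 1) (by simpa using hj)]
        by_cases hjk : j = k
        · subst hjk
          simp [List.getD_eq_getElem?_getD, List.getElem?_set_self' , hj, hpk]
        · simp [List.getD_eq_getElem?_getD, List.getElem?_set_ne (fun h => hjk h.symm), hjk]
      · rw [if_neg hpk, ih ls hj]
        by_cases hjk : j = k
        · subst hjk; simp [hpk]
        · simp [hjk]

theorem foldl_set_length (p : Nat → Bool) (l : List Nat) (ls : List Int) :
    (l.foldl (fun ls k => if p k then ls.set k 1 else ls) ls).length = ls.length := by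
  induction l generalizing ls with
  | nil => rfl
  | cons k t ih => rw [List.foldl_cons]; by_cases h : p k <;> simp [h, ih]

theorem table_getD (q : Int → Nat → Bool) (nums : List Int) (ls : List Int) (h32 : ls.length = 32)
    (j : Nat) (hj : j < 32) :
    (nums.foldl (fun ls a => (List.range 32).foldl (fun ls k => if q a k then ls.set k 1 else ls) ls) ls).getD j 0
      = if nums.any (fun a => q a j) then 1 else ls.getD j 0 := by
  induction nums generalizing ls with
  | nil => simp
  | cons a t ih =>
      rw [List.foldl_cons, ih _ (by rw [foldl_set_length]; exact h32)]
      rw [foldl_set_getD (q a) _ ls j (by omega)]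
      by_cases h : q a j <;> simp [h, hj] <;> tauto

theorem sum_bits (w : Nat) (n : Nat) (h : n < 2 ^ w) :
    (List.range w).foldl (fun (r : Int) k => if n.testBit k then r + 2 ^ k else r) 0 = (n : Int) := by
  induction w generalizing n with
  | zero => interval_cases n; simp
  | succ w ih =>
      rw [List.range_succ, List.foldl_append, List.foldl_cons, List.foldl_nil]
      have hcongr : (List.range w).foldl (fun (r : Int) k => if n.testBit k then r + 2 ^ k else r) 0
          = (List.range w).foldl (fun (r : Int) k => if (n % 2 ^ w).testBit k then r + 2 ^ k else r) 0 := by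
        apply PySem.List.foldl_congr_mem
        intro r k hk
        rw [Nat.testBit_mod_two_pow]
        simp [List.mem_range.mp hk]
      rw [hcongr, ih _ (Nat.mod_lt _ (Nat.two_pow_pos w))]
      rw [Nat.testBit_eq_decide_div_mod_eq]
      have hp : 0 < 2 ^ w := Nat.two_pow_pos w
      have hlt : n < 2 ^ w * 2 := by rw [← Nat.pow_succ]; exact h
      have hdiv : n / 2 ^ w ≤ 1 := by
        rcases Nat.lt_or_ge (n / 2 ^ w) 2 with h' | h'
        · omega
        · exact absurd (Nat.le_div_iff_mul_le hp |>.mp h') (by omega)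
      have hsplit : 2 ^ w * (n / 2 ^ w) + n % 2 ^ w = n := Nat.div_add_mod n (2^w)
      have hd01 : n / 2 ^ w = 0 ∨ n / 2 ^ w = 1 := Nat.le_one_iff_eq_zero_or_eq_one.mp hdiv
      by_cases hb : n / 2 ^ w % 2 = 1
      · have hd1 : n / 2 ^ w = 1 := by
          rcases hd01 with h' | h'
          · rw [h'] at hb; simp at hb
          · exact h'
        rw [hd1, Nat.mul_one] at hsplit
        simp only [hb, decide_true, if_pos]
        push_cast at hsplit ⊢
        linarith
      · have hd0 : n / 2 ^ w = 0 := by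
          rcases hd01 with h' | h'
          · exact h'
          · rw [h'] at hb; simp at hb
        rw [hd0, Nat.mul_zero, Nat.zero_add] at hsplit
        simp only [hb, decide_false, Bool.false_eq_true, if_neg, not_false_iff]
        push_cast at hsplit ⊢
        linarith

theorem lt_two_pow_of_bits (w : Nat) (n : Nat) (h : ∀ j, n.testBit j = true → j < w) : n < 2 ^ w := by
  have hz : n >>> w = 0 := by
    apply Nat.zero_of_testBit_eq_false
    intro i
    rw [Nat.testBit_shiftRight]
    cases hbit : n.testBit (w + i) with
    | false => rfl
    | true => exact absurd (h _ hbit) (by omega)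
  rw [Nat.shiftRight_eq_div_pow] at hz
  exact Nat.lt_of_div_eq_zero (Nat.two_pow_pos w) hz


theorem any_congr' (l : List Int) (p q : Int → Bool) (h : ∀ x ∈ l, p x = q x) : l.any p = l.any q := by
  induction l with
  | nil => rfl
  | cons a t ih =>
    simp only [List.any_cons, h a (by simp), ih (fun x hx => h x (by simp [hx]))]

theorem pyRange32 : PySem.List.pyRange 0 32 1 = List.map (fun k : Nat => (k : Int)) (List.range 32) := by
  rfl

theorem shift_cast (k : Nat) : (1 : Int) <<< (k : Int) = (2:Int)^k := by
  simp [Int.shiftLeft_eq_mul_pow]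

theorem A_eq_sum (nums : List Int) :
    maximumXOR nums
      = (List.range 32).foldl (fun (ret : Int) k =>
          if nums.any (fun a => a.testBit k) then ret + 2 ^ k else ret) 0 := by
  unfold maximumXOR
  simp only [pyRange32, List.foldl_map, Int.toNat_natCast]
  set q : Int → Nat → Bool := fun a k => decide (Int.land a ((1 : Int) <<< (k : Int)) ≠ 0) with hq
  have houter :
      nums.foldl (fun ls a => (List.range 32).foldl (fun (ls : List Int) (k : Nat) =>
          if Int.land a ((1 : Int) <<< (k : Int)) ≠ 0 then ls.set k 1 else ls) ls)
        (List.replicate 32 (0:Int))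
      = nums.foldl (fun ls a => (List.range 32).foldl (fun (ls : List Int) k => if q a k then ls.set k 1 else ls) ls)
        (List.replicate 32 (0:Int)) := by
    apply PySem.List.foldl_congr_mem
    intro acc a _
    apply PySem.List.foldl_congr_mem
    intro acc2 k _
    simp [hq]
  rw [houter]
  set T := nums.foldl (fun ls a => (List.range 32).foldl (fun (ls : List Int) k => if q a k then ls.set k 1 else ls) ls)
        (List.replicate 32 (0:Int)) with hT
  apply PySem.List.foldl_congr_mem
  intro ret k hk
  have hk32 : k < 32 := List.mem_range.mp hk
  have hget : PySem.List.pyGetD T ((k : Nat) : Int) 0 = T.getD k 0 := by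
    simp [PySem.List.pyGetD_natCast]
  rw [hget, hT, table_getD q nums _ (by simp) k hk32]
  have hgetD0 : (List.replicate 32 (0:Int)).getD k 0 = 0 := by
    rw [List.getD_eq_getElem?_getD, List.getElem?_replicate]
    simp [hk32]
  rw [hgetD0, shift_cast]
  have hany : (nums.any (fun a => q a k)) = nums.any (fun a => a.testBit k) := by
    apply any_congr'
    intro a _
    simp [hq, land_one_shift_ne]
  rw [hany]
  by_cases h : nums.any (fun a => a.testBit k) <;> simp [h]

theorem zero_testBit' (j : Nat) : (0:Int).testBit j = false := by simp [Int.testBit]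

theorem final (nums : List Int) : maximumXOR nums = maximumXOR_alt nums := by
  obtain ⟨hnn, hbit⟩ := altFold_spec nums 0 le_rfl
  have hvdef : maximumXOR_alt nums = nums.foldl (fun ret a => Int.lor ret (Int.land a 4294967295)) 0 := rfl
  set v := nums.foldl (fun ret a => Int.lor ret (Int.land a 4294967295)) 0 with hv
  set n := v.toNat with hn
  have hvn : v = Int.ofNat n := by rw [hn]; exact (Int.toNat_of_nonneg hnn).symm
  have hbn : ∀ j, n.testBit j = (decide (j < 32) && nums.any (fun a => a.testBit j)) := by
    intro j
    have : (Int.ofNat n).testBit j = n.testBit j := rfl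
    rw [← this, ← hvn, hbit j, zero_testBit', Bool.false_or]
  have hlt : n < 2 ^ 32 := by
    apply lt_two_pow_of_bits
    intro j hj
    rw [hbn j] at hj
    by_contra h32
    simp [h32] at hj
  rw [A_eq_sum, hvdef, hvn, Int.ofNat_eq_natCast]
  rw [← sum_bits 32 n hlt]
  apply PySem.List.foldl_congr_mem
  intro r k hk
  rw [hbn k]
  simp [List.mem_range.mp hk]

-- ===== VERDICT (by name: the statement is the Claim_ definition above) =====
theorem maximumXOR_spec : Claim_equal_maximumXOR := by
  intro nums _
  exact final nums
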